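-- pv_equiv track=rewrite | github.com/JamesDev51/algorithm | 프로그래머스 (Programmers)/Level_3/자물쇠와 열쇠.py | turn_right
-- ===== SOURCE A (Python) =====
-- def turn_right(m,key):
--     turned_right_key=[[[0]*m for _ in range(m)] for _ in range(4)]
--
--     for y in range(m):
--         for x in range(m):
--             turned_right_key[0][y][x]=key[y][x]
--
--     for idx in range(1,4):
--         for y in range(m):
--             for x in range(m):
--                 turned_right_key[idx][x][m-y-1]=turned_right_key[idx-1][y][x]
--     return turned_right_key
-- ===== SOURCE B (Python) =====
-- def turn_right(m, key):
--     # One pass over the key: scatter each cell into all four rotation slots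
--     # with closed-form index formulas (instead of chained 90-degree passes).
--     out = [[[0] * m for _ in range(m)] for _ in range(4)]
--     for y in range(m):
--         for x in range(m):
--             v = key[y][x]
--             out[0][y][x] = v
--             out[1][x][m - 1 - y] = v
--             out[2][m - 1 - y][m - 1 - x] = v
--             out[3][m - 1 - x][y] = v
--     return out
-- ===== Notes on version B (the rewrite author's own statement) =====
-- stated objective: alternative
-- what changed: Instead of computing each rotation from the previous one in three chained passes, B makes a single pass over the original key and scatters every cell into all four rotation matrices with closed-form index formulas.
import Mathlib
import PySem

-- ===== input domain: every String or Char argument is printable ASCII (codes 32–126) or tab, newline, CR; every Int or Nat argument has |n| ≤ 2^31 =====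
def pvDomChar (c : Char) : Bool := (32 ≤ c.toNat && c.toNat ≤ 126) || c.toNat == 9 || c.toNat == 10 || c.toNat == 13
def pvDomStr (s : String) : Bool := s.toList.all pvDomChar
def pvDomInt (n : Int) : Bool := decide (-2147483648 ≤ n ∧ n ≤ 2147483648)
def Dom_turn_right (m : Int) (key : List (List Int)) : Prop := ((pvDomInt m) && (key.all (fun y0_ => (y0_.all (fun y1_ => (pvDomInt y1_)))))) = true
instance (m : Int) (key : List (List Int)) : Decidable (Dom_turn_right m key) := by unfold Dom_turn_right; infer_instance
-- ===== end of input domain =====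

-- B replaces A's three chained rotate-the-previous-matrix passes by one pass over the
-- original key that scatters each cell into all four rotation slots via closed-form
-- index formulas (objective: alternative decomposition, same cost).

-- ===== PORT A =====
-- Python's `t[j][k] = v` on a 2D list: indices here are always in range when executed
-- (they lie in [0,m)), so List.set is exact.
def pvSet2 (A : List (List Int)) (j k : Nat) (v : Int) : List (List Int) :=
  A.set j ((A.getD j []).set k v)

-- Python's `t[i][j][k] = v` on a 3D list (same in-range remark).
def pvSet3 (T : List (List (List Int))) (i j k : Nat) (v : Int) : List (List (List Int)) :=
  T.set i (pvSet2 (T.getD i []) j k v)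

-- Literal port of A: build the 4×m×m zero structure, copy key into slot 0,
-- then three passes, each rotating the previous slot.  Reads key[y][x] via pyGetD:
-- exact under Pre_turn_right (outside it Python raises IndexError).
def turn_right (m : Int) (key : List (List Int)) : List (List (List Int)) :=
  let init : List (List (List Int)) :=
    (List.range 4).map (fun _ => (PySem.List.pyRange 0 m 1).map (fun _ => List.replicate m.toNat 0))
  let t1 := (PySem.List.pyRange 0 m 1).foldl (fun acc y =>
    (PySem.List.pyRange 0 m 1).foldl (fun acc2 x =>
      pvSet3 acc2 0 y.toNat x.toNat
        (PySem.List.pyGetD (PySem.List.pyGetD key y []) x 0)) acc) init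
  (PySem.List.pyRange 1 4 1).foldl (fun acc idx =>
    (PySem.List.pyRange 0 m 1).foldl (fun acc2 y =>
      (PySem.List.pyRange 0 m 1).foldl (fun acc3 x =>
        pvSet3 acc3 idx.toNat x.toNat (m - y - 1).toNat
          (PySem.List.pyGetD (PySem.List.pyGetD (PySem.List.pyGetD acc3 (idx - 1) []) y []) x 0)) acc2) acc) t1

-- ===== PORT B =====
-- Literal port of B (Source B): one pass over the key, four scatter writes per cell.
def turn_right_alt (m : Int) (key : List (List Int)) : List (List (List Int)) :=
  let out : List (List (List Int)) :=
    (List.range 4).map (fun _ => (PySem.List.pyRange 0 m 1).map (fun _ => List.replicate m.toNat 0))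
  (PySem.List.pyRange 0 m 1).foldl (fun acc y =>
    (PySem.List.pyRange 0 m 1).foldl (fun acc2 x =>
      let v := PySem.List.pyGetD (PySem.List.pyGetD key y []) x 0
      let a0 := pvSet3 acc2 0 y.toNat x.toNat v
      let a1 := pvSet3 a0 1 x.toNat (m - 1 - y).toNat v
      let a2 := pvSet3 a1 2 (m - 1 - y).toNat (m - 1 - x).toNat v
      pvSet3 a2 3 (m - 1 - x).toNat y.toNat v) acc) out

-- ===== PRECONDITION & SPEC =====
-- Pre_ excludes exactly the inputs on which Python A raises IndexError while reading
-- key[y][x] (key smaller than m×m); it admits every input on which A returns.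
def Pre_turn_right (m : Int) (key : List (List Int)) : Prop :=
  m.toNat ≤ key.length ∧ ∀ row ∈ key.take m.toNat, m.toNat ≤ row.length
instance (m : Int) (key : List (List Int)) : Decidable (Pre_turn_right m key) := by
  unfold Pre_turn_right; infer_instance

def pvWitness_turn_right : Int × List (List Int) := (2, [[1, 2], [3, 4]])

def Spec_turn_right (m : Int) (key : List (List Int)) (out : List (List (List Int))) : Prop := out = turn_right_alt m key
instance (m : Int) (key : List (List Int)) (out : List (List (List Int))) : Decidable (Spec_turn_right m key out) := by unfold Spec_turn_right; infer_instance

-- ===== CLAIM (what is proved, stated in full; the proofs are below) =====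
def Claim_equal_turn_right : Prop := ∀ (m : Int) (key : List (List Int)), Dom_turn_right m key → Pre_turn_right m key → Spec_turn_right m key (turn_right m key)

-- ===== LEMMAS AND PROOFS =====

-- 3D read, shape predicate, tabulated matrix, generic write-fold.
def pvGet2 (A : List (List Int)) (a b : Nat) : Int := (A.getD a []).getD b 0
def pvGet3 (T : List (List (List Int))) (i a b : Nat) : Int := pvGet2 (T.getD i []) a b
def PvCube (n : Nat) (T : List (List (List Int))) : Prop :=
  T.length = 4 ∧ ∀ M ∈ T, M.length = n ∧ ∀ row ∈ M, row.length = n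
def pvTab (n : Nat) (f : Nat → Nat → Int) : List (List Int) :=
  (List.range n).map fun y => (List.range n).map fun x => f y x
def pvPairs (n : Nat) : List (Nat × Nat) :=
  (List.range n).flatMap (fun y => (List.range n).map (fun x => (y, x)))
def pvFold {E : Type} (cf jf kf : E → Nat) (vf : E → Int) (es : List E)
    (T : List (List (List Int))) : List (List (List Int)) :=
  es.foldl (fun acc e => pvSet3 acc (cf e) (jf e) (kf e) (vf e)) T

-- rotation closed forms
def pvG (key : List (List Int)) (n : Nat) : Nat → Nat → Nat → Int
  | 0 => fun a b => pvGet2 key a b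
  | s + 1 => fun a b => pvG key n s (n - 1 - b) a

theorem pv_length_set2 (A : List (List Int)) (j k : Nat) (v : Int) :
    (pvSet2 A j k v).length = A.length := by
  simp [pvSet2]

theorem pv_get2_set2_same (A : List (List Int)) {j k : Nat} (v : Int)
    (hj : j < A.length) (hk : k < (A.getD j []).length) :
    pvGet2 (pvSet2 A j k v) j k = v := by
  unfold pvGet2 pvSet2
  rw [List.getD_eq_getElem?_getD] at hk
  simp [List.getD_eq_getElem?_getD, List.getElem?_set_self hj, List.getElem?_set_self hk]

theorem pv_get2_set2_other (A : List (List Int)) {a b j k : Nat} (v : Int)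
    (h : a ≠ j ∨ b ≠ k) :
    pvGet2 (pvSet2 A j k v) a b = pvGet2 A a b := by
  unfold pvGet2 pvSet2
  by_cases haj : a = j
  · subst haj
    have hb : b ≠ k := by tauto
    by_cases hal : a < A.length
    · simp [List.getD_eq_getElem?_getD, List.getElem?_set_self hal,
        List.getElem?_set_ne (Ne.symm hb)]
    · have h1 : ∀ r : List Int, (A.set a r)[a]? = (none : Option (List Int)) := by
        intro r; rw [List.getElem?_eq_none_iff]; simp; omega
      have h2 : A[a]? = (none : Option (List Int)) := by
        rw [List.getElem?_eq_none_iff]; omega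
      simp [List.getD_eq_getElem?_getD, h1, h2]
  · simp [List.getD_eq_getElem?_getD, List.getElem?_set_ne (Ne.symm haj)]

theorem pv_rows_set2 {n : Nat} (A : List (List Int)) {j : Nat} (k : Nat) (v : Int)
    (hA : ∀ row ∈ A, row.length = n) (hj : j < A.length) :
    ∀ row ∈ pvSet2 A j k v, row.length = n := by
  intro row hr
  rcases List.mem_or_eq_of_mem_set hr with h | h
  · exact hA _ h
  · subst h
    have hm : A.getD j [] ∈ A := by
      rw [List.getD_eq_getElem?_getD, List.getElem?_eq_getElem hj]
      exact List.getElem_mem _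
    simp only [List.length_set]
    exact hA _ hm

theorem pv_cube_set3 {n : Nat} {T : List (List (List Int))} {i j k : Nat} (v : Int)
    (hT : PvCube n T) (hi : i < 4) (hj : j < n) (hk : k < n) :
    PvCube n (pvSet3 T i j k v) := by
  obtain ⟨hl, hM⟩ := hT
  have hi' : i < T.length := by omega
  have hmem : T.getD i [] ∈ T := by
    rw [List.getD_eq_getElem?_getD, List.getElem?_eq_getElem hi']
    exact List.getElem_mem _
  refine ⟨by simp [pvSet3, hl], ?_⟩
  intro M hMmem
  rcases List.mem_or_eq_of_mem_set hMmem with h | h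
  · exact hM _ h
  · subst h
    refine ⟨by rw [pv_length_set2]; exact (hM _ hmem).1, ?_⟩
    exact pv_rows_set2 _ _ _ (hM _ hmem).2 (by rw [(hM _ hmem).1]; exact hj)

theorem pv_getD3_set3_ne {T : List (List (List Int))} {i i' j k : Nat} (v : Int)
    (h : i' ≠ i) : (pvSet3 T i j k v).getD i' [] = T.getD i' [] := by
  simp [pvSet3, List.getD_eq_getElem?_getD, List.getElem?_set_ne (Ne.symm h)]

theorem pv_getD3_set3_self {T : List (List (List Int))} {i : Nat} (j k : Nat) (v : Int)
    (hi : i < T.length) : (pvSet3 T i j k v).getD i [] = pvSet2 (T.getD i []) j k v := by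
  simp [pvSet3, List.getD_eq_getElem?_getD, List.getElem?_set_self hi]

theorem pv_get3_set3_other {n : Nat} {T : List (List (List Int))} {i i' j k a b : Nat} (v : Int)
    (hT : PvCube n T) (hi : i < 4)
    (h : ¬(i = i' ∧ j = a ∧ k = b)) :
    pvGet3 (pvSet3 T i j k v) i' a b = pvGet3 T i' a b := by
  by_cases hii : i = i'
  · subst hii
    have hjk : a ≠ j ∨ b ≠ k := by tauto
    have hi' : i < T.length := hT.1 ▸ hi
    unfold pvGet3
    rw [pv_getD3_set3_self _ _ _ hi']
    exact pv_get2_set2_other _ _ hjk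
  · unfold pvGet3
    rw [pv_getD3_set3_ne _ (Ne.symm hii)]

theorem pv_get3_set3_same {n : Nat} {T : List (List (List Int))} {i j k : Nat} (v : Int)
    (hT : PvCube n T) (hi : i < 4) (hj : j < n) (hk : k < n) :
    pvGet3 (pvSet3 T i j k v) i j k = v := by
  obtain ⟨hl, hM⟩ := hT
  have hi' : i < T.length := by omega
  have hmem : T.getD i [] ∈ T := by
    rw [List.getD_eq_getElem?_getD, List.getElem?_eq_getElem hi']
    exact List.getElem_mem _
  set R := T.getD i [] with hR
  have hjlen : j < R.length := by rw [(hM _ hmem).1]; exact hj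
  have hrow : R.getD j [] ∈ R := by
    rw [List.getD_eq_getElem?_getD, List.getElem?_eq_getElem hjlen]
    exact List.getElem_mem _
  have hk' : k < (R.getD j []).length := by
    rw [(hM _ hmem).2 _ hrow]; exact hk
  unfold pvGet3
  rw [pv_getD3_set3_self _ _ _ hi']
  exact pv_get2_set2_same _ _ hjlen hk'

theorem pv_cube_fold {E : Type} {n : Nat} (cf jf kf : E → Nat) (vf : E → Int)
    (es : List E) {T : List (List (List Int))} (hT : PvCube n T)
    (hr : ∀ e ∈ es, cf e < 4 ∧ jf e < n ∧ kf e < n) :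
    PvCube n (pvFold cf jf kf vf es T) := by
  induction es generalizing T with
  | nil => simpa [pvFold]
  | cons e t ih =>
      rw [pvFold, List.foldl_cons]
      exact ih (pv_cube_set3 _ hT (hr e (by simp)).1 (hr e (by simp)).2.1 (hr e (by simp)).2.2)
        (fun e' he' => hr e' (by simp [he']))

theorem pv_get3_fold_none {E : Type} {n : Nat} (cf jf kf : E → Nat) (vf : E → Int)
    (es : List E) {T : List (List (List Int))} (hT : PvCube n T)
    (hr : ∀ e ∈ es, cf e < 4 ∧ jf e < n ∧ kf e < n) (i a b : Nat)
    (hnone : ∀ e ∈ es, ¬(cf e = i ∧ jf e = a ∧ kf e = b)) :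
    pvGet3 (pvFold cf jf kf vf es T) i a b = pvGet3 T i a b := by
  induction es generalizing T with
  | nil => rfl
  | cons e t ih =>
      rw [pvFold, List.foldl_cons]
      rw [show (t.foldl (fun acc e => pvSet3 acc (cf e) (jf e) (kf e) (vf e))
            (pvSet3 T (cf e) (jf e) (kf e) (vf e))) =
          pvFold cf jf kf vf t (pvSet3 T (cf e) (jf e) (kf e) (vf e)) from rfl]
      rw [ih (pv_cube_set3 _ hT (hr e (by simp)).1 (hr e (by simp)).2.1 (hr e (by simp)).2.2)
        (fun e' he' => hr e' (by simp [he'])) (fun e' he' => hnone e' (by simp [he']))]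
      exact pv_get3_set3_other (n := n) _ hT (hr e (by simp)).1 (fun hx => hnone e (by simp) hx)

theorem pv_get3_fold_unique {E : Type} {n : Nat} (cf jf kf : E → Nat) (vf : E → Int)
    (es : List E) {T : List (List (List Int))} (hT : PvCube n T)
    (hr : ∀ e ∈ es, cf e < 4 ∧ jf e < n ∧ kf e < n) {i a b : Nat} {e0 : E}
    (he0 : e0 ∈ es) (hc : cf e0 = i) (hj : jf e0 = a) (hk : kf e0 = b)
    (huniq : ∀ e ∈ es, cf e = i ∧ jf e = a ∧ kf e = b → vf e = vf e0) :
    pvGet3 (pvFold cf jf kf vf es T) i a b = vf e0 := by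
  induction es generalizing T e0 with
  | nil => simp at he0
  | cons e t ih =>
      have hre := hr e (by simp)
      have hcube := pv_cube_set3 (vf e) hT hre.1 hre.2.1 hre.2.2
      rw [pvFold, List.foldl_cons]
      rw [show (t.foldl (fun acc e => pvSet3 acc (cf e) (jf e) (kf e) (vf e))
            (pvSet3 T (cf e) (jf e) (kf e) (vf e))) =
          pvFold cf jf kf vf t (pvSet3 T (cf e) (jf e) (kf e) (vf e)) from rfl]
      by_cases hm : ∃ e' ∈ t, cf e' = i ∧ jf e' = a ∧ kf e' = b
      · obtain ⟨e', he', hp⟩ := hm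
        have hv : vf e' = vf e0 := huniq e' (by simp [he']) hp
        rw [ih (e0 := e') hcube (fun e'' he'' => hr e'' (by simp [he''])) he' hp.1 hp.2.1 hp.2.2
          (fun e'' he'' hq => ((huniq e'' (by simp [he'']) hq).trans hv.symm))]
        exact hv
      · have hm' : ∀ e' ∈ t, ¬(cf e' = i ∧ jf e' = a ∧ kf e' = b) := by
          intro e' he' hx
          exact hm ⟨e', he', hx⟩
        have he0e : e0 = e := by
          rcases List.mem_cons.mp he0 with h | h
          · exact h
          · exact absurd ⟨hc, hj, hk⟩ (hm' e0 h)
        subst he0e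
        rw [pv_get3_fold_none cf jf kf vf t hcube
          (fun e'' he'' => hr e'' (by simp [he''])) i a b hm']
        rw [← hc, ← hj, ← hk]
        exact pv_get3_set3_same _ hT hre.1 hre.2.1 hre.2.2

theorem pv_ext3 {n : Nat} {T T' : List (List (List Int))}
    (hT : PvCube n T) (hT' : PvCube n T')
    (h : ∀ i < 4, ∀ a < n, ∀ b < n, pvGet3 T i a b = pvGet3 T' i a b) : T = T' := by
  obtain ⟨hl, hM⟩ := hT
  obtain ⟨hl', hM'⟩ := hT'
  apply List.ext_getElem (by omega)
  intro i hi hi'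
  have h1 := hM _ (List.getElem_mem hi)
  have h1' := hM' _ (List.getElem_mem hi')
  apply List.ext_getElem (by rw [h1.1, h1'.1])
  intro a ha ha'
  have h2 := h1.2 _ (List.getElem_mem ha)
  have h2' := h1'.2 _ (List.getElem_mem ha')
  apply List.ext_getElem (by rw [h2, h2'])
  intro b hb hb'
  have hg := h i (by omega) a (by rw [h1.1] at ha; exact ha) b (by rw [h2] at hb; exact hb)
  simpa [pvGet3, pvGet2, List.getD_eq_getElem?_getD, List.getElem?_eq_getElem,
    hi, hi', ha, ha', hb, hb'] using hg

theorem pv_get2_tab {n : Nat} (f : Nat → Nat → Int) {a b : Nat} (ha : a < n) (hb : b < n) :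
    pvGet2 (pvTab n f) a b = f a b := by
  simp [pvGet2, pvTab, List.getD_eq_getElem?_getD, ha, hb]

theorem pv_mem_pairs {n : Nat} {p : Nat × Nat} : p ∈ pvPairs n ↔ p.1 < n ∧ p.2 < n := by
  cases p with
  | mk y x =>
      simp only [pvPairs, List.mem_flatMap, List.mem_map, List.mem_range]
      constructor
      · rintro ⟨y', hy', x', hx', h⟩
        obtain ⟨h1, h2⟩ := Prod.mk.injEq .. ▸ h
        simp at h
        omega
      · rintro ⟨h1, h2⟩
        exact ⟨y, h1, x, h2, rfl⟩

theorem pv_foldl_flatMap {α β γ : Type} (l : List α) (f : α → List β) (g : γ → β → γ)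
    (init : γ) : (l.flatMap f).foldl g init = l.foldl (fun a x => (f x).foldl g a) init := by
  induction l generalizing init with
  | nil => simp
  | cons h t ih => simp [List.foldl_append, ih]

theorem pv_double_fold_pairs {γ : Type} (n : Nat) (step : γ → Nat → Nat → γ) (T : γ) :
    (List.range n).foldl (fun a y => (List.range n).foldl (fun a2 x => step a2 y x) a) T
      = (pvPairs n).foldl (fun a p => step a p.1 p.2) T := by
  rw [pvPairs, pv_foldl_flatMap]
  simp [List.foldl_map]

theorem pv_fold_read_eq {E : Type} (es : List E) (c r : Nat) (h : r ≠ c)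
    (jf kf : E → Nat) (f : List (List Int) → E → Int) (T : List (List (List Int)))
    (hc : c < T.length) :
    es.foldl (fun acc e => pvSet3 acc c (jf e) (kf e) (f (acc.getD r []) e)) T
      = es.foldl (fun acc e => pvSet3 acc c (jf e) (kf e) (f (T.getD r []) e)) T := by
  induction es generalizing T with
  | nil => rfl
  | cons e t ih =>
      simp only [List.foldl_cons]
      rw [ih (pvSet3 T c (jf e) (kf e) (f (T.getD r []) e)) (by simp [pvSet3]; omega)]
      simp only [pv_getD3_set3_ne _ h]

theorem pv_pyRange_nat (m : Int) (hm : 0 ≤ m) :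
    PySem.List.pyRange 0 m 1 = (List.range m.toNat).map (fun k : Nat => (k : Int)) := by
  rw [PySem.List.pyRange_one]
  simp

def pvZ (n : Nat) : List (List Int) := List.replicate n (List.replicate n 0)
def pvCs (key : List (List Int)) (n : Nat) (s : Nat) : List (List (List Int)) :=
  (List.range 4).map (fun i => if i < s then pvTab n (pvG key n i) else pvZ n)
def pvEB (n : Nat) : List (Nat × (Nat × Nat)) :=
  (pvPairs n).flatMap (fun p => [(0, p), (1, p), (2, p), (3, p)])
def pvJfB (n : Nat) (e : Nat × (Nat × Nat)) : Nat :=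
  match e.1 with | 0 => e.2.1 | 1 => e.2.2 | 2 => n - 1 - e.2.1 | _ => n - 1 - e.2.2
def pvKfB (n : Nat) (e : Nat × (Nat × Nat)) : Nat :=
  match e.1 with | 0 => e.2.2 | 1 => n - 1 - e.2.1 | 2 => n - 1 - e.2.2 | _ => e.2.1

theorem pv_length_Cs (key : List (List Int)) (n s : Nat) : (pvCs key n s).length = 4 := by
  simp [pvCs]

theorem pv_cube_Cs (key : List (List Int)) (n s : Nat) : PvCube n (pvCs key n s) := by
  refine ⟨by simp [pvCs], ?_⟩
  intro M hM
  simp only [pvCs, List.mem_map, List.mem_range] at hM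
  obtain ⟨i, hi, hMi⟩ := hM
  subst hMi
  split
  · refine ⟨by simp [pvTab], ?_⟩
    intro row hr
    simp only [pvTab, List.mem_map, List.mem_range] at hr
    obtain ⟨y, hy, hrow⟩ := hr
    subst hrow
    simp
  · refine ⟨by simp [pvZ], ?_⟩
    intro row hr
    rw [List.eq_of_mem_replicate hr]
    simp

theorem pv_getD_Cs (key : List (List Int)) (n s : Nat) {i : Nat} (hi : i < 4) :
    (pvCs key n s).getD i [] = if i < s then pvTab n (pvG key n i) else pvZ n := by
  simp [pvCs, List.getD_eq_getElem?_getD, hi]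

theorem pv_get2_Z (n a b : Nat) : pvGet2 (pvZ n) a b = 0 := by
  simp only [pvGet2, pvZ, List.getD_eq_getElem?_getD, List.getElem?_replicate]
  split_ifs <;> simp

theorem pv_get3_Cs (key : List (List Int)) (n s : Nat) {i a b : Nat} (hi : i < 4)
    (ha : a < n) (hb : b < n) :
    pvGet3 (pvCs key n s) i a b = if i < s then pvG key n i a b else 0 := by
  rw [pvGet3, pv_getD_Cs key n s hi]
  split
  · exact pv_get2_tab _ ha hb
  · exact pv_get2_Z n a b

theorem pv_stage0 (key : List (List Int)) (n : Nat) (hn : 0 < n) :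
    pvFold (fun _ => 0) (fun p => p.1) (fun p => p.2)
      (fun p => pvGet2 key p.1 p.2) (pvPairs n) (pvCs key n 0) = pvCs key n 1 := by
  have hr : ∀ p ∈ pvPairs n, (0:Nat) < 4 ∧ p.1 < n ∧ p.2 < n := by
    intro p hp
    obtain ⟨h1, h2⟩ := pv_mem_pairs.mp hp
    exact ⟨by omega, h1, h2⟩
  apply pv_ext3 (pv_cube_fold _ _ _ _ _ (pv_cube_Cs key n 0) hr) (pv_cube_Cs key n 1)
  intro i hi a ha b hb
  by_cases his : i = 0
  · subst his
    have he0 : ((a, b) : Nat × Nat) ∈ pvPairs n := pv_mem_pairs.mpr ⟨ha, hb⟩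
    rw [pv_get3_fold_unique _ _ _ _ _ (pv_cube_Cs key n 0) hr he0 rfl rfl rfl ?uniq]
    case uniq =>
      intro e he hq
      obtain ⟨e1, e2⟩ := e
      simp only at hq
      rw [hq.2.1, hq.2.2]
    rw [pv_get3_Cs key n 1 hi ha hb]
    simp [pvG]
  · rw [pv_get3_fold_none _ _ _ _ _ (pv_cube_Cs key n 0) hr i a b
      (by intro e he hx; exact his hx.1.symm)]
    rw [pv_get3_Cs key n 0 hi ha hb, pv_get3_Cs key n 1 hi ha hb]
    split_ifs with h1 h2 <;> omega

theorem pv_stageA (key : List (List Int)) (n : Nat) (hn : 0 < n) (s : Nat) (hs : s < 3) :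
    pvFold (fun _ => s + 1) (fun p => p.2) (fun p => n - 1 - p.1)
      (fun p => pvGet2 ((pvCs key n (s + 1)).getD s []) p.1 p.2) (pvPairs n)
      (pvCs key n (s + 1)) = pvCs key n (s + 2) := by
  have hr : ∀ p ∈ pvPairs n, s + 1 < 4 ∧ p.2 < n ∧ n - 1 - p.1 < n := by
    intro p hp
    obtain ⟨h1, h2⟩ := pv_mem_pairs.mp hp
    exact ⟨by omega, h2, by omega⟩
  apply pv_ext3 (pv_cube_fold _ _ _ _ _ (pv_cube_Cs key n (s + 1)) hr) (pv_cube_Cs key n (s + 2))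
  intro i hi a ha b hb
  by_cases his : i = s + 1
  · subst his
    have he0 : ((n - 1 - b, a) : Nat × Nat) ∈ pvPairs n := pv_mem_pairs.mpr ⟨by omega, ha⟩
    rw [pv_get3_fold_unique _ _ _ _ _ (pv_cube_Cs key n (s + 1)) hr he0 rfl rfl
      (by simp; omega) ?uniq]
    case uniq =>
      intro e he hq
      obtain ⟨e1, e2⟩ := e
      obtain ⟨hm1, hm2⟩ := pv_mem_pairs.mp he
      simp only at hq hm1 hm2 ⊢
      have h1 : e1 = n - 1 - b := by omega
      have h2 : e2 = a := hq.2.1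
      rw [h1, h2]
    rw [pv_get3_Cs key n (s + 2) hi ha hb]
    rw [pv_getD_Cs key n (s + 1) (by omega)]
    rw [if_pos (by omega)]
    rw [pv_get2_tab _ (by omega) ha]
    simp [pvG]
  · rw [pv_get3_fold_none _ _ _ _ _ (pv_cube_Cs key n (s + 1)) hr i a b
      (by intro e he hx; exact his hx.1.symm)]
    rw [pv_get3_Cs key n (s + 1) hi ha hb, pv_get3_Cs key n (s + 2) hi ha hb]
    split_ifs with h1 h2 <;> first | rfl | omega

theorem pv_stageB (key : List (List Int)) (n : Nat) (hn : 0 < n) :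
    pvFold (fun e => e.1) (pvJfB n) (pvKfB n)
      (fun e => pvGet2 key e.2.1 e.2.2) (pvEB n) (pvCs key n 0) = pvCs key n 4 := by
  have hmemEB : ∀ e ∈ pvEB n, (e.1 = 0 ∨ e.1 = 1 ∨ e.1 = 2 ∨ e.1 = 3) ∧ e.2.1 < n ∧ e.2.2 < n := by
    intro e he
    simp only [pvEB, List.mem_flatMap] at he
    obtain ⟨p, hp, hep⟩ := he
    obtain ⟨h1, h2⟩ := pv_mem_pairs.mp hp
    fin_cases hep <;> simp_all
  have hr : ∀ e ∈ pvEB n, e.1 < 4 ∧ pvJfB n e < n ∧ pvKfB n e < n := by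
    intro e he
    obtain ⟨hc, h1, h2⟩ := hmemEB e he
    obtain ⟨c, y, x⟩ := e
    simp only at hc h1 h2
    rcases hc with h | h | h | h <;> subst h <;>
      exact ⟨by omega, by simp [pvJfB]; omega, by simp [pvKfB]; omega⟩
  apply pv_ext3 (pv_cube_fold _ _ _ _ _ (pv_cube_Cs key n 0) hr) (pv_cube_Cs key n 4)
  intro i hi a ha b hb
  -- the unique writer of slot (i,a,b)
  have hEBmem : ∀ (c : Nat) (p : Nat × Nat), p ∈ pvPairs n → (c = 0 ∨ c = 1 ∨ c = 2 ∨ c = 3) →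
      ((c, p) : Nat × (Nat × Nat)) ∈ pvEB n := by
    intro c p hp hc
    simp only [pvEB, List.mem_flatMap]
    exact ⟨p, hp, by rcases hc with h | h | h | h <;> subst h <;> simp⟩
  rw [pv_get3_Cs key n 4 hi ha hb, if_pos hi]
  interval_cases i
  · rw [pv_get3_fold_unique (i := 0) (a := a) (b := b) _ _ _ _ _ (pv_cube_Cs key n 0) hr
      (hEBmem 0 (a, b) (pv_mem_pairs.mpr ⟨ha, hb⟩) (by omega)) rfl rfl rfl ?u0]
    case u0 =>
      intro e he hq
      obtain ⟨hc, h1, h2⟩ := hmemEB e he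
      obtain ⟨c, y, x⟩ := e
      simp only at hc h1 h2
      rcases hc with h | h | h | h <;> subst h <;>
        simp only [pvJfB, pvKfB] at hq <;> simp only at hq ⊢ <;>
        (have hy : y = a := by omega
         have hx : x = b := by omega
         rw [hy, hx])
    simp [pvG]
  · rw [pv_get3_fold_unique (i := 1) (a := a) (b := b) _ _ _ _ _ (pv_cube_Cs key n 0) hr
      (hEBmem 1 (n - 1 - b, a) (pv_mem_pairs.mpr ⟨by omega, ha⟩) (by omega)) rfl rfl
      (by simp only [pvKfB]; omega) ?u1]
    case u1 =>
      intro e he hq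
      obtain ⟨hc, h1, h2⟩ := hmemEB e he
      obtain ⟨c, y, x⟩ := e
      simp only at hc h1 h2
      rcases hc with h | h | h | h <;> subst h <;>
        simp only [pvJfB, pvKfB] at hq <;> simp only at hq ⊢ <;>
        (have hy : y = n - 1 - b := by omega
         have hx : x = a := by omega
         rw [hy, hx])
    simp [pvG]
  · rw [pv_get3_fold_unique (i := 2) (a := a) (b := b) _ _ _ _ _ (pv_cube_Cs key n 0) hr
      (hEBmem 2 (n - 1 - a, n - 1 - b) (pv_mem_pairs.mpr ⟨by omega, by omega⟩) (by omega)) rfl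
      (by simp only [pvJfB]; omega) (by simp only [pvKfB]; omega) ?u2]
    case u2 =>
      intro e he hq
      obtain ⟨hc, h1, h2⟩ := hmemEB e he
      obtain ⟨c, y, x⟩ := e
      simp only at hc h1 h2
      rcases hc with h | h | h | h <;> subst h <;>
        simp only [pvJfB, pvKfB] at hq <;> simp only at hq ⊢ <;>
        (have hy : y = n - 1 - a := by omega
         have hx : x = n - 1 - b := by omega
         rw [hy, hx])
    simp [pvG]
  · rw [pv_get3_fold_unique (i := 3) (a := a) (b := b) _ _ _ _ _ (pv_cube_Cs key n 0) hr
      (hEBmem 3 (b, n - 1 - a) (pv_mem_pairs.mpr ⟨hb, by omega⟩) (by omega)) rfl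
      (by simp only [pvJfB]; omega) (by simp only [pvKfB]) ?u3]
    case u3 =>
      intro e he hq
      obtain ⟨hc, h1, h2⟩ := hmemEB e he
      obtain ⟨c, y, x⟩ := e
      simp only at hc h1 h2
      rcases hc with h | h | h | h <;> subst h <;>
        simp only [pvJfB, pvKfB] at hq <;> simp only at hq ⊢ <;>
        (have hy : y = b := by omega
         have hx : x = n - 1 - a := by omega
         rw [hy, hx])
    simp only [pvG]
    have hbb : n - 1 - (n - 1 - b) = b := by omega
    rw [hbb]

theorem pv_stage0_full (key : List (List Int)) (n : Nat) (hn : 0 < n) :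
    (List.range n).foldl (fun acc y =>
      (List.range n).foldl (fun acc2 x =>
        pvSet3 acc2 0 y x ((key.getD y []).getD x 0)) acc) (pvCs key n 0) = pvCs key n 1 := by
  rw [pv_double_fold_pairs]
  exact pv_stage0 key n hn

theorem pv_stageA_full (key : List (List Int)) (n : Nat) (hn : 0 < n) (s : Nat) (hs : s < 3) :
    (List.range n).foldl (fun acc (y : Nat) =>
      (List.range n).foldl (fun acc3 (x : Nat) =>
        pvSet3 acc3 (s + 1) x ((n : Int) - (y : Int) - 1).toNat
          (((acc3.getD s []).getD y []).getD x 0)) acc) (pvCs key n (s + 1))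
      = pvCs key n (s + 2) := by
  rw [pv_double_fold_pairs]
  have h1 := pv_fold_read_eq (pvPairs n) (s + 1) s (by omega)
    (fun p => p.2) (fun p => ((n : Int) - (p.1 : Int) - 1).toNat)
    (fun M p => ((M.getD p.1 []).getD p.2 0))
    (pvCs key n (s + 1)) (by rw [pv_length_Cs]; omega)
  beta_reduce at h1
  rw [h1]
  have hcong := List.foldl_ext
    (fun (acc : List (List (List Int))) (p : Nat × Nat) => pvSet3 acc (s + 1) p.2
      ((n : Int) - (p.1 : Int) - 1).toNat
      ((((pvCs key n (s + 1)).getD s []).getD p.1 []).getD p.2 0))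
    (fun (acc : List (List (List Int))) (p : Nat × Nat) => pvSet3 acc (s + 1) p.2 (n - 1 - p.1)
      (pvGet2 ((pvCs key n (s + 1)).getD s []) p.1 p.2))
    (pvCs key n (s + 1)) (l := pvPairs n) ?hcg
  case hcg =>
    intro acc p hp
    obtain ⟨h1', h2'⟩ := pv_mem_pairs.mp hp
    have ht : ((n : Int) - (p.1 : Int) - 1).toNat = n - 1 - p.1 := by omega
    beta_reduce
    rw [ht]
    rfl
  rw [hcong]
  exact pv_stageA key n hn s hs

theorem pv_stageB_full (key : List (List Int)) (n : Nat) (hn : 0 < n) :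
    (List.range n).foldl (fun acc (y : Nat) =>
      (List.range n).foldl (fun acc2 (x : Nat) =>
        pvSet3 (pvSet3 (pvSet3 (pvSet3 acc2 0 y x ((key.getD y []).getD x 0))
            1 x ((n : Int) - 1 - (y : Int)).toNat ((key.getD y []).getD x 0))
          2 ((n : Int) - 1 - (y : Int)).toNat ((n : Int) - 1 - (x : Int)).toNat
            ((key.getD y []).getD x 0))
          3 ((n : Int) - 1 - (x : Int)).toNat y ((key.getD y []).getD x 0)) acc)
      (pvCs key n 0) = pvCs key n 4 := by
  rw [pv_double_fold_pairs]
  have hcong := List.foldl_ext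
    (fun (acc : List (List (List Int))) (p : Nat × Nat) =>
      pvSet3 (pvSet3 (pvSet3 (pvSet3 acc 0 p.1 p.2 ((key.getD p.1 []).getD p.2 0))
          1 p.2 ((n : Int) - 1 - (p.1 : Int)).toNat ((key.getD p.1 []).getD p.2 0))
        2 ((n : Int) - 1 - (p.1 : Int)).toNat ((n : Int) - 1 - (p.2 : Int)).toNat
          ((key.getD p.1 []).getD p.2 0))
        3 ((n : Int) - 1 - (p.2 : Int)).toNat p.1 ((key.getD p.1 []).getD p.2 0))
    (fun (acc : List (List (List Int))) (p : Nat × Nat) =>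
      pvSet3 (pvSet3 (pvSet3 (pvSet3 acc 0 p.1 p.2 (pvGet2 key p.1 p.2))
          1 p.2 (n - 1 - p.1) (pvGet2 key p.1 p.2))
        2 (n - 1 - p.1) (n - 1 - p.2) (pvGet2 key p.1 p.2))
        3 (n - 1 - p.2) p.1 (pvGet2 key p.1 p.2))
    (pvCs key n 0) (l := pvPairs n) ?hcg
  case hcg =>
    intro acc p hp
    obtain ⟨h1', h2'⟩ := pv_mem_pairs.mp hp
    have ht1 : ((n : Int) - 1 - (p.1 : Int)).toNat = n - 1 - p.1 := by omega
    have ht2 : ((n : Int) - 1 - (p.2 : Int)).toNat = n - 1 - p.2 := by omega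
    beta_reduce
    rw [ht1, ht2]
    rfl
  rw [hcong]
  have hflat : pvFold (fun e => e.1) (pvJfB n) (pvKfB n)
      (fun e => pvGet2 key e.2.1 e.2.2) (pvEB n) (pvCs key n 0)
      = (pvPairs n).foldl (fun acc p =>
          pvSet3 (pvSet3 (pvSet3 (pvSet3 acc 0 p.1 p.2 (pvGet2 key p.1 p.2))
              1 p.2 (n - 1 - p.1) (pvGet2 key p.1 p.2))
            2 (n - 1 - p.1) (n - 1 - p.2) (pvGet2 key p.1 p.2))
            3 (n - 1 - p.2) p.1 (pvGet2 key p.1 p.2)) (pvCs key n 0) := by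
    rw [pvFold, pvEB, pv_foldl_flatMap]
    apply List.foldl_ext
    intro acc p hp
    simp [pvJfB, pvKfB]
  rw [← hflat]
  exact pv_stageB key n hn

theorem pv_init_eq (key : List (List Int)) (n : Nat) :
    (List.range 4).map (fun _ =>
      ((List.range n).map (fun k : Nat => (k : Int))).map (fun _ => List.replicate n (0 : Int)))
      = pvCs key n 0 := by
  simp only [pvCs, Nat.not_lt_zero, if_false]
  apply List.map_congr_left
  intro i hi
  simp [pvZ, Function.comp_def, List.map_const']

theorem pv_pyRange_123 : PySem.List.pyRange 1 4 1 = [(1 : Int), 2, 3] := by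
  rw [PySem.List.pyRange_one]
  decide

theorem turn_right_eq_alt (m : Int) (key : List (List Int)) :
    turn_right m key = turn_right_alt m key := by
  by_cases hm : m ≤ 0
  · have hr : PySem.List.pyRange 0 m 1 = [] := PySem.List.pyRange_one_eq_nil hm
    simp [turn_right, turn_right_alt, hr, pv_pyRange_123]
  · obtain ⟨n, hn⟩ : ∃ n : Nat, m = (n : Int) := ⟨m.toNat, by omega⟩
    have hn0 : 0 < n := by omega
    subst hn
    have hA : turn_right (n : Int) key = pvCs key n 4 := by
      simp only [turn_right, pv_pyRange_nat (n : Int) (by positivity), pv_pyRange_123,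
        Int.toNat_natCast, List.foldl_map, List.foldl_cons, List.foldl_nil,
        Int.toNat_one, (by decide : ((2 : Int)).toNat = 2), (by decide : ((3 : Int)).toNat = 3),
        (by norm_num : ((1 : Int) - 1) = ((0 : Nat) : Int)),
        (by norm_num : ((2 : Int) - 1) = ((1 : Nat) : Int)),
        (by norm_num : ((3 : Int) - 1) = ((2 : Nat) : Int)),
        PySem.List.pyGetD_natCast]
      rw [pv_init_eq key n]
      rw [pv_stage0_full key n hn0]
      have h1 : (List.range n).foldl (fun acc (y : Nat) =>
          (List.range n).foldl (fun acc3 (x : Nat) =>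
            pvSet3 acc3 1 x ((n : Int) - (y : Int) - 1).toNat
              (((acc3.getD 0 []).getD y []).getD x 0)) acc) (pvCs key n 1) = pvCs key n 2 :=
        pv_stageA_full key n hn0 0 (by omega)
      have h2 : (List.range n).foldl (fun acc (y : Nat) =>
          (List.range n).foldl (fun acc3 (x : Nat) =>
            pvSet3 acc3 2 x ((n : Int) - (y : Int) - 1).toNat
              (((acc3.getD 1 []).getD y []).getD x 0)) acc) (pvCs key n 2) = pvCs key n 3 :=
        pv_stageA_full key n hn0 1 (by omega)
      have h3 : (List.range n).foldl (fun acc (y : Nat) =>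
          (List.range n).foldl (fun acc3 (x : Nat) =>
            pvSet3 acc3 3 x ((n : Int) - (y : Int) - 1).toNat
              (((acc3.getD 2 []).getD y []).getD x 0)) acc) (pvCs key n 3) = pvCs key n 4 :=
        pv_stageA_full key n hn0 2 (by omega)
      rw [h1, h2, h3]
    have hB : turn_right_alt (n : Int) key = pvCs key n 4 := by
      simp only [turn_right_alt, pv_pyRange_nat (n : Int) (by positivity),
        Int.toNat_natCast, List.foldl_map, PySem.List.pyGetD_natCast]
      rw [pv_init_eq key n]
      exact pv_stageB_full key n hn0
    rw [hA, hB]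

-- ===== VERDICT (by name: the statement is the Claim_ definition above) =====
theorem turn_right_spec : Claim_equal_turn_right := by
  intro m key _ _
  unfold Spec_turn_right
  exact turn_right_eq_alt m key
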